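-- pv_equiv track=rewrite | github.com/faruxd/faruexee-alert-bot | faruexee_alert_bot.py | find_pivot_highs
-- ===== SOURCE A (Python) =====
-- def find_pivot_highs(highs, lookback):
--     """Exact match of Pine Script: ta.pivothigh(high, lookback, lookback)"""
--     n    = len(highs)
--     fire = [None] * n
--     for i in range(lookback * 2, n):
--         center_idx = i - lookback
--         center_val = highs[center_idx]
--         window     = highs[i - 2*lookback : i + 1]
--         if all(center_val > window[j] for j in range(len(window)) if j != lookback):
--             fire[i] = center_val
--     return fire
-- ===== SOURCE B (Python) =====
-- def _dist_prev_ge(vals):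
--     """d[c] = distance from c back to the nearest j < c with vals[j] >= vals[c],
--     or c + 1 if there is none.  Monotonic stack, O(n) total."""
--     st = []
--     d = []
--     for c in range(len(vals)):
--         v = vals[c]
--         while st and vals[st[-1]] < v:
--             st.pop()
--         d.append(c - st[-1] if st else c + 1)
--         st.append(c)
--     return d
--
--
-- def find_pivot_highs(highs, lookback):
--     """Exact match of Pine Script: ta.pivothigh(high, lookback, lookback)"""
--     n = len(highs)
--     if 2 * lookback >= n:
--         return [None] * n
--     left = _dist_prev_ge(highs)
--     right = _dist_prev_ge(highs[::-1])
--     out = []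
--     for i in range(n):
--         if i < 2 * lookback:
--             out.append(None)
--         else:
--             c = i - lookback
--             if left[c] > lookback and right[n - 1 - c] > lookback:
--                 out.append(highs[c])
--             else:
--                 out.append(None)
--     return out
-- ===== Notes on version B (the rewrite author's own statement) =====
-- stated objective: alternative
-- what changed: Replaced the per-index rescan of the whole 2*lookback+1 window with two monotonic-stack passes computing, for every position, the distance to the nearest earlier/later element >= it; a center fires iff both distances exceed lookback.
import Mathlib
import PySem

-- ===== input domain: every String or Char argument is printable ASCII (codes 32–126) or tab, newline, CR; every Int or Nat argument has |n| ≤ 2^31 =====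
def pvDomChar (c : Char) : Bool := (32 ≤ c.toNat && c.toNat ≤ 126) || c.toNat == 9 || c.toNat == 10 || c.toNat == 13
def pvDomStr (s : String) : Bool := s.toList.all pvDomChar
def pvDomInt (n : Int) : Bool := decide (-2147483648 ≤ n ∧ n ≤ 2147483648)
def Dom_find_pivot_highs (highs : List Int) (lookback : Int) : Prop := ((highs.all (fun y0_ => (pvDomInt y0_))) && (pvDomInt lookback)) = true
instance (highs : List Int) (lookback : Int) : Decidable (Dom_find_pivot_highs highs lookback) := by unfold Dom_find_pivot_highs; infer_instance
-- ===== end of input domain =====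

-- Alternative algorithm: B replaces A's per-center window rescan by two monotonic-stack "distance to nearest >=" passes; return-value equivalence is proved for lookback >= 0, where A returns.


-- ===== PORT A =====
def find_pivot_highs (highs : List Int) (lookback : Int) : List (Option Int) :=
  let n : Int := (highs.length : Int)
  let fire : List (Option Int) := List.replicate highs.length none
  (PySem.List.pyRange (lookback * 2) n 1).foldl (fun fire i =>
    let center_idx : Int := i - lookback
    -- highs[center_idx]: pyGetD is exact under Pre_ (index then in range)
    let center_val : Int := PySem.List.pyGetD highs center_idx 0
    let window : List Int := PySem.List.slice highs (some (i - 2 * lookback)) (some (i + 1))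
    if (List.range window.length).all (fun j =>
         decide ((j : Int) = lookback) || decide (center_val > window.getD j 0)) then
      PySem.List.pySetD fire i (some center_val)
    else fire) fire

-- ===== PORT B =====
-- _dist_prev_ge: the Python while-pop loop on the stack is List.dropWhile from the top (head = top)
def distPrevGE (vals : List Int) : List Int :=
  ((List.range vals.length).foldl (fun (st_d : List Nat × List Int) c =>
    let v := vals.getD c 0
    let st' := st_d.1.dropWhile (fun j => vals.getD j 0 < v)
    let dv : Int := match st' with
      | [] => (c : Int) + 1
      | j :: _ => (c : Int) - (j : Int)
    (c :: st', st_d.2 ++ [dv])) ([], [])).2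

def find_pivot_highs_alt (highs : List Int) (lookback : Int) : List (Option Int) :=
  let n := highs.length
  if 2 * lookback ≥ (n : Int) then List.replicate n none
  else
  let left := distPrevGE highs
  let right := distPrevGE highs.reverse   -- highs[::-1]
  (List.range n).foldl (fun (out : List (Option Int)) (i : Nat) =>
    if (i : Int) < 2 * lookback then out ++ [none]
    else
      let c : Int := (i : Int) - lookback
      -- left[c], right[n-1-c], highs[c]: getD is exact under Pre_ (indices then in range)
      if lookback < left.getD c.toNat 0 ∧ lookback < right.getD ((n : Int) - 1 - c).toNat 0 then
        out ++ [some (highs.getD c.toNat 0)]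
      else out ++ [none]) []

-- ===== PRECONDITION & SPEC =====
-- Pre_ excludes exactly lookback < 0, where Python A raises IndexError (highs[center_idx] or fire[i] out of range) on every highs, including [].
def Pre_find_pivot_highs (highs : List Int) (lookback : Int) : Prop := 0 ≤ lookback
instance (highs : List Int) (lookback : Int) : Decidable (Pre_find_pivot_highs highs lookback) := by unfold Pre_find_pivot_highs; infer_instance
def pvWitness_find_pivot_highs : List Int × Int := ([1, 3, 2], 1)

def Spec_find_pivot_highs (highs : List Int) (lookback : Int) (out : List (Option Int)) : Prop := out = find_pivot_highs_alt highs lookback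
instance (highs : List Int) (lookback : Int) (out : List (Option Int)) : Decidable (Spec_find_pivot_highs highs lookback out) := by unfold Spec_find_pivot_highs; infer_instance

-- ===== CLAIM (what is proved, stated in full; the proofs are below) =====
def Claim_equal_find_pivot_highs : Prop := ∀ (highs : List Int) (lookback : Int), Dom_find_pivot_highs highs lookback → Pre_find_pivot_highs highs lookback → Spec_find_pivot_highs highs lookback (find_pivot_highs highs lookback)

-- ===== LEMMAS AND PROOFS =====
-- ===== stack machinery =====
def pvCond (v : List Int) (c j : Nat) : Bool := decide (∀ k : Nat, k < c → j < k → v.getD k 0 ≤ v.getD j 0)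
def pvSt (v : List Int) (c : Nat) : List Nat := ((List.range c).filter (pvCond v c)).reverse
def pvSt' (v : List Int) (c : Nat) : List Nat := (pvSt v c).dropWhile (fun j => v.getD j 0 < v.getD c 0)
def pvDval (v : List Int) (c : Nat) : Int := match pvSt' v c with | [] => (c:Int)+1 | j :: _ => (c:Int) - (j:Int)

lemma pv_dropWhile_eq_filter {α : Type} (p : α → Bool) : ∀ (l : List α), l.Pairwise (fun a b => p a = false → p b = false) → l.dropWhile p = l.filter (fun x => !p x) := by
  intro l h
  induction l with
  | nil => rfl
  | cons x t ih =>
    rcases List.pairwise_cons.mp h with ⟨hx, ht⟩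
    by_cases hp : p x = true
    · simp [List.dropWhile_cons, List.filter_cons, hp, ih ht]
    · simp only [Bool.not_eq_true] at hp
      simp only [List.dropWhile_cons, hp]
      simp only [Bool.false_eq_true, if_neg, not_false_iff]
      refine (List.filter_eq_self.mpr ?_).symm
      intro a ha
      rcases List.mem_cons.mp ha with rfl | ha'
      · simp [hp]
      · simp [hx a ha' hp]

lemma pv_mem_pvSt (v : List Int) (c : Nat) (j : Nat) :
    j ∈ pvSt v c ↔ j < c ∧ ∀ k : Nat, k < c → j < k → v.getD k 0 ≤ v.getD j 0 := by
  simp [pvSt, pvCond, List.mem_filter]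

lemma pv_pairwise_pvSt (v : List Int) (c : Nat) : (pvSt v c).Pairwise (· > ·) := by
  unfold pvSt
  rw [List.pairwise_reverse]
  exact List.Pairwise.filter _ (List.pairwise_lt_range)

lemma pv_pairwise_val_pvSt (v : List Int) (c : Nat) :
    (pvSt v c).Pairwise (fun a b => v.getD a 0 ≤ v.getD b 0) := by
  unfold pvSt
  rw [List.pairwise_reverse]
  have base : ((List.range c).filter (pvCond v c)).Pairwise (· < ·) :=
    List.Pairwise.filter _ (List.pairwise_lt_range)
  refine base.imp_of_mem ?_
  intro a b ha hb hab
  have hacond : ∀ k : Nat, k < c → a < k → v.getD k 0 ≤ v.getD a 0 := by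
    simpa [pvCond] using (List.mem_filter.mp ha).2
  have hbc : b < c := List.mem_range.mp (List.mem_filter.mp hb).1
  exact hacond b hbc hab

lemma pv_pairwise_drop_hyp (v : List Int) (c : Nat) :
    (pvSt v c).Pairwise (fun a b => decide (v.getD a 0 < v.getD c 0) = false → decide (v.getD b 0 < v.getD c 0) = false) := by
  refine (pv_pairwise_val_pvSt v c).imp ?_
  intro a b hab hpa
  simp only [decide_eq_false_iff_not, not_lt] at hpa ⊢
  omega

lemma pv_St'_eq_filter (v : List Int) (c : Nat) :
    pvSt' v c = (pvSt v c).filter (fun j => !(decide (v.getD j 0 < v.getD c 0))) := by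
  unfold pvSt'
  exact pv_dropWhile_eq_filter _ _ (pv_pairwise_drop_hyp v c)

lemma pv_mem_pvSt' (v : List Int) (c : Nat) (j : Nat) :
    j ∈ pvSt' v c ↔ j < c ∧ (∀ k : Nat, k < c → j < k → v.getD k 0 ≤ v.getD j 0) ∧ v.getD c 0 ≤ v.getD j 0 := by
  rw [pv_St'_eq_filter, List.mem_filter]
  simp only [pv_mem_pvSt, Bool.not_eq_eq_eq_not, Bool.not_true, decide_eq_false_iff_not, not_lt]
  tauto

lemma pv_pairwise_pvSt' (v : List Int) (c : Nat) : (pvSt' v c).Pairwise (· > ·) :=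
  (pv_pairwise_pvSt v c).sublist (List.dropWhile_sublist _)

lemma pv_step_stack (v : List Int) (c : Nat) : c :: pvSt' v c = pvSt v (c+1) := by
  rw [pv_St'_eq_filter]
  unfold pvSt
  rw [List.range_succ, List.filter_append, List.filter_reverse, List.filter_filter]
  have hc : pvCond v (c+1) c = true := by
    simp only [pvCond, decide_eq_true_eq]; intro k hk hk'; omega
  simp only [List.filter_cons, hc, if_pos, List.filter_nil, List.reverse_append,
    List.reverse_cons, List.reverse_nil, List.nil_append, List.cons_append]
  congr 2
  refine List.filter_congr ?_
  intro j hj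
  have hjc : j < c := List.mem_range.mp hj
  rw [Bool.eq_iff_iff]
  simp only [pvCond, Bool.and_eq_true, decide_eq_true_eq, Bool.not_eq_true',
    decide_eq_false_iff_not, not_lt]
  constructor
  · rintro ⟨h2, h1⟩ k hk hjk
    rcases Nat.lt_succ_iff_lt_or_eq.mp hk with h | h
    · exact h1 k h hjk
    · subst h; exact h2
  · intro h
    exact ⟨h c (by omega) hjc, fun k hk hjk => h k (by omega) hjk⟩

lemma pv_fold_inv (v : List Int) (c : Nat) :
    (List.range c).foldl (fun (st_d : List Nat × List Int) c =>
      let vv := v.getD c 0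
      let st' := st_d.1.dropWhile (fun j => v.getD j 0 < vv)
      let dv : Int := match st' with
        | [] => (c : Int) + 1
        | j :: _ => (c : Int) - (j : Int)
      (c :: st', st_d.2 ++ [dv])) ([], [])
    = (pvSt v c, (List.range c).map (pvDval v)) := by
  induction c with
  | zero => simp [pvSt]
  | succ c ih =>
    rw [List.range_succ, List.foldl_append, ih]
    simp only [List.foldl_cons, List.foldl_nil, List.map_append, List.map_cons, List.map_nil]
    refine Prod.ext ?_ ?_
    · simpa using pv_step_stack v c
    · simp [pvDval, pvSt']

lemma pv_distPrevGE_eq (v : List Int) :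
    distPrevGE v = (List.range v.length).map (pvDval v) := by
  unfold distPrevGE
  rw [pv_fold_inv]

lemma pv_stack_gap (v : List Int) (c : Nat) (t : Int)
    (H : ∀ j : Nat, j < c → (∀ k : Nat, k < c → j < k → v.getD k 0 ≤ v.getD j 0) →
          v.getD c 0 ≤ v.getD j 0 → (j : Int) ≤ t) :
    ∀ k : Nat, t < (k : Int) → k < c → v.getD k 0 < v.getD c 0 := by
  have main : ∀ d : Nat, ∀ k : Nat, c - k = d → t < (k : Int) → k < c → v.getD k 0 < v.getD c 0 := by
    intro d
    induction d using Nat.strong_induction_on with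
    | _ d ih =>
      intro k hd hkt hkc
      by_contra hge
      replace hge : v.getD c 0 ≤ v.getD k 0 := Int.not_lt.mp hge
      have hk_le : (k : Int) ≤ t := by
        refine H k hkc ?_ hge
        intro m hm hkm
        have hmlt : v.getD m 0 < v.getD c 0 := ih (c - m) (by omega) m rfl (by omega) hm
        omega
      omega
  intro k hkt hkc
  exact main (c - k) k rfl hkt hkc

lemma pv_dval_gt_iff (v : List Int) (c : Nat) (L : Int) (hLc : L ≤ (c : Int)) :
    (L < pvDval v c) ↔ ∀ j : Nat, (c : Int) - L ≤ (j : Int) → j < c → v.getD j 0 < v.getD c 0 := by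
  rcases hst : pvSt' v c with _ | ⟨j0, rest⟩
  · have hnone : ∀ j : Nat, j < c → (∀ k : Nat, k < c → j < k → v.getD k 0 ≤ v.getD j 0) →
        v.getD c 0 ≤ v.getD j 0 → False := by
      intro j h1 h2 h3
      have : j ∈ pvSt' v c := (pv_mem_pvSt' v c j).mpr ⟨h1, h2, h3⟩
      simp [hst] at this
    have hall : ∀ j : Nat, (c : Int) - L ≤ (j : Int) → j < c → v.getD j 0 < v.getD c 0 := by
      refine fun j hj hjc => pv_stack_gap v c (-1) ?_ j ?_ hjc
      · intro j' h1 h2 h3; exact absurd (hnone j' h1 h2 h3) (by simp)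
      · omega
    simp only [pvDval, hst]
    constructor
    · intro _; exact hall
    · intro _; omega
  · have hj0 : j0 ∈ pvSt' v c := by rw [hst]; exact List.mem_cons_self
    rcases (pv_mem_pvSt' v c j0).mp hj0 with ⟨hj0c, _, hj0ge⟩
    have hle : ∀ j : Nat, j ∈ pvSt' v c → j ≤ j0 := by
      intro j hj
      rcases List.mem_cons.mp (by rw [← hst]; exact hj) with rfl | hjr
      · exact le_refl _
      · have hp := pv_pairwise_pvSt' v c
        rw [hst, List.pairwise_cons] at hp
        exact le_of_lt (hp.1 j hjr)
    simp only [pvDval, hst]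
    constructor
    · intro hlt j hj hjc
      refine pv_stack_gap v c (j0 : Int) ?_ j (by omega) hjc
      intro j' h1 h2 h3
      exact_mod_cast Int.ofNat_le.mpr (hle j' ((pv_mem_pvSt' v c j').mpr ⟨h1, h2, h3⟩))
    · intro hall
      by_contra hnl
      replace hnl : (c : Int) - (j0 : Int) ≤ L := Int.not_lt.mp hnl
      have : v.getD j0 0 < v.getD c 0 := hall j0 (by omega) hj0c
      omega

-- ===== port A characterization =====
def pvStepA (v : List Int) (L : Int) : List (Option Int) → Int → List (Option Int) :=
  fun fire i =>
    let center_idx : Int := i - L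
    let center_val : Int := PySem.List.pyGetD v center_idx 0
    let window : List Int := PySem.List.slice v (some (i - 2 * L)) (some (i + 1))
    if (List.range window.length).all (fun j =>
         decide ((j : Int) = L) || decide (center_val > window.getD j 0)) then
      PySem.List.pySetD fire i (some center_val)
    else fire

def pvCondA (v : List Int) (L : Int) (i : Int) : Bool :=
  (List.range (PySem.List.slice v (some (i - 2 * L)) (some (i + 1))).length).all (fun j =>
    decide ((j : Int) = L) || decide (PySem.List.pyGetD v (i - L) 0 > (PySem.List.slice v (some (i - 2 * L)) (some (i + 1))).getD j 0))

lemma pv_A_eq_foldl (v : List Int) (L : Int) :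
    find_pivot_highs v L
      = (PySem.List.pyRange (L * 2) (v.length : Int) 1).foldl (pvStepA v L) (List.replicate v.length none) := rfl

lemma pv_stepA_length (v : List Int) (L : Int) (fire : List (Option Int)) (i : Int) :
    (pvStepA v L fire i).length = fire.length := by
  unfold pvStepA
  dsimp only
  split
  · exact PySem.List.length_pySetD _ _ _
  · rfl

lemma pv_foldl_stepA_length (v : List Int) (L : Int) :
    ∀ (l : List Int) (fire : List (Option Int)), (l.foldl (pvStepA v L) fire).length = fire.length := by
  intro l
  induction l with
  | nil => intro fire; rfl
  | cons x t ih => intro fire; rw [List.foldl_cons, ih, pv_stepA_length]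

lemma pv_stepA_getD (v : List Int) (L : Int) (fire : List (Option Int)) (a : Int)
    (ha : 0 ≤ a) (han : a < (fire.length : Int)) (t : Nat) :
    (pvStepA v L fire a).getD t none
      = if (t : Int) = a ∧ pvCondA v L a then some (PySem.List.pyGetD v (a - L) 0) else fire.getD t none := by
  unfold pvStepA
  dsimp only
  by_cases hc : pvCondA v L a = true
  · rw [if_pos (by exact hc)]
    rw [PySem.List.pySetD_of_nonneg fire (some (PySem.List.pyGetD v (a - L) 0)) ha]
    by_cases hta : (t : Int) = a
    · have htn : a.toNat = t := by omega
      rw [if_pos ⟨hta, hc⟩]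
      simp only [List.getD, htn]
      rw [List.getElem?_set_self (by omega)]
      rfl
    · rw [if_neg (by tauto)]
      simp only [List.getD]
      rw [List.getElem?_set_ne (by omega)]
  · rw [if_neg (by exact hc), if_neg (by tauto)]

lemma pv_A_fold (v : List Int) (L : Int) :
    ∀ (m : Nat) (a : Int), 0 ≤ a → ((v.length : Int) - a).toNat = m →
    ∀ (fire : List (Option Int)), fire.length = v.length →
    ∀ (t : Nat), t < v.length →
    ((PySem.List.pyRange a (v.length : Int) 1).foldl (pvStepA v L) fire).getD t none
      = if a ≤ (t : Int) ∧ pvCondA v L t then some (PySem.List.pyGetD v ((t : Int) - L) 0)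
        else fire.getD t none := by
  intro m
  induction m with
  | zero =>
    intro a ha hm fire hlen t ht
    rw [PySem.List.pyRange_one_eq_nil (by omega)]
    rw [if_neg (by omega)]
    rfl
  | succ m ih =>
    intro a ha hm fire hlen t ht
    rw [PySem.List.pyRange_one_cons (by omega), List.foldl_cons]
    rw [ih (a+1) (by omega) (by omega) _ (by rw [pv_stepA_length]; exact hlen) t ht]
    rw [pv_stepA_getD v L fire _ ha (by omega)]
    by_cases hat : (t : Int) = a
    · subst hat
      by_cases hc : pvCondA v L ((t : Nat) : Int) = true
      · simp only [hc, and_true]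
        rw [if_neg (by omega)]
        simp
      · simp [hc]
    · by_cases hc : pvCondA v L ((t : Nat) : Int) = true <;> by_cases hca : pvCondA v L a = true <;>
        simp only [hc, hca, and_true, and_false, if_false, if_true] <;> split_ifs <;>
        first | rfl | omega | (exfalso; clear ih; simp_all)

lemma pv_A_getD (v : List Int) (L : Int) (hL : 0 ≤ L) (t : Nat) (ht : t < v.length) :
    (find_pivot_highs v L).getD t none
      = if L * 2 ≤ (t : Int) ∧ pvCondA v L t then some (PySem.List.pyGetD v ((t : Int) - L) 0)
        else none := by
  rw [pv_A_eq_foldl]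
  rw [pv_A_fold v L (((v.length : Int) - L * 2).toNat) (L * 2) (by omega) rfl _ (by simp) t ht]
  split_ifs with h
  · rfl
  · simp [List.getD]

-- ===== port B characterization =====
lemma pv_B_eq_map (v : List Int) (L : Int) :
    find_pivot_highs_alt v L = (List.range v.length).map (fun (i : Nat) =>
      if (i : Int) < 2 * L then none
      else if L < (distPrevGE v).getD (((i : Int) - L)).toNat 0 ∧
              L < (distPrevGE v.reverse).getD (((v.length : Int) - 1 - ((i : Int) - L))).toNat 0
        then some (v.getD (((i : Int) - L)).toNat 0) else none) := by
  unfold find_pivot_highs_alt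
  dsimp only
  by_cases hg : 2 * L ≥ (v.length : Int)
  · rw [if_pos hg]
    refine (List.eq_replicate_iff.mpr ⟨by simp, ?_⟩).symm
    intro b hb
    rcases List.mem_map.mp hb with ⟨i, hi, rfl⟩
    rw [if_pos (by have := List.mem_range.mp hi; omega)]
  rw [if_neg hg]
  have h := PySem.List.foldl_append_singleton_eq_map
    (f := fun i : Nat =>
      if (i : Int) < 2 * L then none
      else if L < (distPrevGE v).getD (((i : Int) - L)).toNat 0 ∧
              L < (distPrevGE v.reverse).getD (((v.length : Int) - 1 - ((i : Int) - L))).toNat 0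
        then some (v.getD (((i : Int) - L)).toNat 0) else none)
    (List.range v.length) []
  rw [List.nil_append] at h
  rw [← h]
  clear h
  have hfun : (fun (out : List (Option Int)) (i : Nat) =>
      if (i : Int) < 2 * L then out ++ [none]
      else
        if L < (distPrevGE v).getD (((i : Int) - L)).toNat 0 ∧
            L < (distPrevGE v.reverse).getD (((v.length : Int) - 1 - ((i : Int) - L))).toNat 0 then
          out ++ [some (v.getD (((i : Int) - L)).toNat 0)]
        else out ++ [none])
      = (fun (acc : List (Option Int)) (x : Nat) =>
      acc ++
        [if (x : Int) < 2 * L then none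
          else
            if L < (distPrevGE v).getD (((x : Int) - L)).toNat 0 ∧
                L < (distPrevGE v.reverse).getD (((v.length : Int) - 1 - ((x : Int) - L))).toNat 0 then
              some (v.getD (((x : Int) - L)).toNat 0)
            else none]) := by
    funext out i
    split_ifs <;> rfl
  rw [hfun]

lemma pv_rev_getD (v : List Int) (j : Nat) (hj : j < v.length) :
    v.reverse.getD j 0 = v.getD (v.length - 1 - j) 0 := by
  simp only [List.getD]
  rw [List.getElem?_eq_getElem (by simpa using hj), List.getElem?_eq_getElem (by omega)]
  simp [List.getElem_reverse]

lemma pv_condA_iff (v : List Int) (L : Int) (hL : 0 ≤ L) (t : Nat) (ht : t < v.length)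
    (h2L : 2 * L ≤ (t : Int)) :
    pvCondA v L t = true ↔
      ∀ k : Nat, k < v.length → (t : Int) - 2 * L ≤ (k : Int) → k ≤ t → (k : Int) ≠ (t : Int) - L →
        v.getD k 0 < v.getD ((t : Int) - L).toNat 0 := by
  have hw : PySem.List.slice v (some ((t : Int) - 2 * L)) (some ((t : Int) + 1))
      = List.take (((t : Int) + 1).toNat - ((t : Int) - 2 * L).toNat) (List.drop ((t : Int) - 2 * L).toNat v) :=
    PySem.List.slice_toNat v (by omega) (by omega)
  have hcv : PySem.List.pyGetD v ((t : Int) - L) 0 = v.getD ((t : Int) - L).toNat 0 := by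
    rw [PySem.List.pyGetD_eq_getElem v 0 (by omega) (by omega),
      List.getD_eq_getElem v 0 (by omega)]
  set w : Nat := ((t : Int) - 2 * L).toNat with hwdef
  have hwt : (w : Int) = (t : Int) - 2 * L := by omega
  have hlen : (PySem.List.slice v (some ((t : Int) - 2 * L)) (some ((t : Int) + 1))).length
      = (t + 1) - w := by
    rw [hw, List.length_take, List.length_drop]
    omega
  unfold pvCondA
  rw [List.all_eq_true]
  constructor
  · intro h k hk hk1 hk2 hk3
    have hjw : k - w < (t + 1) - w := by omega
    have hmem : (k - w) ∈ List.range (PySem.List.slice v (some ((t : Int) - 2 * L)) (some ((t : Int) + 1))).length := by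
      rw [hlen, List.mem_range]; exact hjw
    have := h _ hmem
    simp only [Bool.or_eq_true, decide_eq_true_eq] at this
    rcases this with h' | h'
    · exfalso; apply hk3; omega
    · rw [hcv] at h'
      have hget : (PySem.List.slice v (some ((t : Int) - 2 * L)) (some ((t : Int) + 1))).getD (k - w) 0
          = v.getD k 0 := by
        rw [hw]
        simp only [List.getD]
        rw [List.getElem?_take_of_lt (by omega), List.getElem?_drop,
          show w + (k - w) = k by omega]
      rw [hget] at h'
      exact h'
  · intro h j hj
    rw [List.mem_range, hlen] at hj
    simp only [Bool.or_eq_true, decide_eq_true_eq]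
    by_cases hjL : (j : Int) = L
    · exact Or.inl hjL
    · refine Or.inr ?_
      rw [hcv]
      have hget : (PySem.List.slice v (some ((t : Int) - 2 * L)) (some ((t : Int) + 1))).getD j 0
          = v.getD (w + j) 0 := by
        rw [hw]
        simp only [List.getD]
        rw [List.getElem?_take_of_lt (by omega), List.getElem?_drop]
      rw [hget]
      exact h (w + j) (by omega) (by omega) (by omega) (by omega)

lemma pv_A_length (v : List Int) (L : Int) : (find_pivot_highs v L).length = v.length := by
  rw [pv_A_eq_foldl, pv_foldl_stepA_length]
  simp

lemma pv_B_length (v : List Int) (L : Int) : (find_pivot_highs_alt v L).length = v.length := by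
  rw [pv_B_eq_map]
  simp

lemma pv_getD_eq (v : List Int) (L : Int) (hL : 0 ≤ L) (t : Nat) (ht : t < v.length) :
    (find_pivot_highs v L).getD t none = (find_pivot_highs_alt v L).getD t none := by
  rw [pv_A_getD v L hL t ht, pv_B_eq_map]
  have hmap : ∀ (f : Nat → Option Int), ((List.range v.length).map f).getD t none = f t := by
    intro f
    simp [List.getD, List.getElem?_range, ht]
  rw [hmap]
  by_cases h2 : (t : Int) < 2 * L
  · rw [if_pos h2, if_neg (by rintro ⟨h, -⟩; omega)]
  · rw [if_neg h2]
    set ct : Nat := ((t : Int) - L).toNat with hctdef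
    have hct : (ct : Int) = (t : Int) - L := by omega
    have hctn : ct < v.length := by omega
    have hcv : PySem.List.pyGetD v ((t : Int) - L) 0 = v.getD ct 0 := by
      rw [PySem.List.pyGetD_eq_getElem v 0 (by omega) (by omega),
        List.getD_eq_getElem v 0 (by omega)]
    have hrt : ((v.length : Int) - 1 - ((t : Int) - L)).toNat = v.length - 1 - ct := by omega
    rw [hrt]
    have hleft : (distPrevGE v).getD ct 0 = pvDval v ct := by
      rw [pv_distPrevGE_eq]
      simp [List.getD, List.getElem?_range, hctn]
    have hright : (distPrevGE v.reverse).getD (v.length - 1 - ct) 0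
        = pvDval v.reverse (v.length - 1 - ct) := by
      have hb : v.length - 1 - ct < v.length := by omega
      rw [pv_distPrevGE_eq]
      simp [List.getD, List.getElem?_range, List.length_reverse, hb]
    rw [hleft, hright, hcv]
    have hiff : (pvCondA v L t = true)
        ↔ (L < pvDval v ct ∧ L < pvDval v.reverse (v.length - 1 - ct)) := by
      rw [pv_condA_iff v L hL t ht (by omega)]
      rw [pv_dval_gt_iff v ct L (by omega)]
      rw [pv_dval_gt_iff v.reverse (v.length - 1 - ct) L (by omega)]
      constructor
      · intro hP
        constructor
        · intro j hj1 hj2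
          have := hP j (by omega) (by omega) (by omega) (by omega)
          rwa [← hctdef] at this
        · intro j hj1 hj2
          rw [pv_rev_getD v j (by omega), pv_rev_getD v (v.length - 1 - ct) (by omega),
            show v.length - 1 - (v.length - 1 - ct) = ct by omega]
          have := hP (v.length - 1 - j) (by omega) (by omega) (by omega) (by omega)
          rwa [← hctdef] at this
      · rintro ⟨hQ1, hQ2⟩ k hk hk1 hk2 hk3
        rw [← hctdef]
        rcases lt_trichotomy k ct with hlt | heq | hgt
        · exact hQ1 k (by omega) hlt
        · exfalso; apply hk3; omega
        · have := hQ2 (v.length - 1 - k) (by omega) (by omega)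
          rwa [pv_rev_getD v _ (by omega), pv_rev_getD v _ (by omega),
            show v.length - 1 - (v.length - 1 - ct) = ct by omega,
            show v.length - 1 - (v.length - 1 - k) = k by omega] at this
    by_cases hc : pvCondA v L t = true
    · rw [if_pos ⟨by omega, hc⟩, if_pos (hiff.mp hc)]
    · rw [if_neg (fun h => hc h.2), if_neg (fun h => hc (hiff.mpr h))]


-- ===== VERDICT (by name: the statement is the Claim_ definition above) =====
theorem find_pivot_highs_spec : Claim_equal_find_pivot_highs := by
  intro highs lookback hdom hpre
  unfold Spec_find_pivot_highs
  have hL : 0 ≤ lookback := hpre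
  apply List.ext_getElem
  · rw [pv_A_length, pv_B_length]
  · intro i h1 h2
    have h1' : i < highs.length := by rw [pv_A_length] at h1; exact h1
    have := pv_getD_eq highs lookback hL i h1'
    rwa [List.getD_eq_getElem _ _ h1, List.getD_eq_getElem _ _ h2] at this
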